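-- pv_equiv track=rewrite | github.com/ifeniak/algo_labs | lab3/discount.py | create_counting
-- ===== SOURCE A (Python) =====
-- def create_counting(prices: list):
--     high_bound = max(prices)
--     low_bound = min(prices)
--     distribution = [0] * (high_bound - low_bound + 1)
--     for price in prices:
--         distribution[price - low_bound] += 1
--     for i in range(1, len(distribution)):
--         distribution[i] += distribution[i - 1]
--     return distribution
-- ===== SOURCE B (Python) =====
-- import bisect
--
--
-- def create_counting(prices: list):
--     high_bound = max(prices)
--     low_bound = min(prices)
--     ordered = sorted(prices)
--     return [bisect.bisect_right(ordered, low_bound + i)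
--             for i in range(high_bound - low_bound + 1)]
-- ===== Notes on version B (the rewrite author's own statement) =====
-- stated objective: alternative
-- what changed: Replaces the frequency array + in-place prefix-sum pass with sorting the prices once and reading each cumulative count off the sorted list by binary search (bisect_right).
import Mathlib
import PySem

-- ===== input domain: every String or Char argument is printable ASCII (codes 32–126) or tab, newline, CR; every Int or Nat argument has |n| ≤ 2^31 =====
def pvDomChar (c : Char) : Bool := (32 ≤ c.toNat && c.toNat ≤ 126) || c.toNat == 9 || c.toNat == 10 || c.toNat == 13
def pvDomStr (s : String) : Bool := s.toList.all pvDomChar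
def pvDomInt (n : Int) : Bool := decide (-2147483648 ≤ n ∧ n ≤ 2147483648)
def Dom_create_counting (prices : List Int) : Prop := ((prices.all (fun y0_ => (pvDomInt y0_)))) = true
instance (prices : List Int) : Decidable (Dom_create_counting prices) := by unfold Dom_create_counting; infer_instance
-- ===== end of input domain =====

-- B replaces A's frequency array + prefix-sum pass with sort + binary search (bisect_right); same values, alternative algorithm.

-- ===== PORT A =====
def create_counting (prices : List Int) : List Int :=
  match PySem.List.max? prices (fun x => x), PySem.List.min? prices (fun x => x) with
  | some high_bound, some low_bound =>
      let distribution := List.replicate (high_bound - low_bound + 1).toNat (0 : Int)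
      -- for price in prices: distribution[price - low_bound] += 1   (index always in range, so getD/set are exact)
      let distribution := prices.foldl (fun d price =>
          d.set (price - low_bound).toNat (d.getD (price - low_bound).toNat 0 + 1)) distribution
      -- for i in range(1, len(distribution)): distribution[i] += distribution[i - 1]
      (PySem.List.pyRange 1 (distribution.length : Int)).foldl (fun d i =>
          d.set i.toNat (d.getD i.toNat 0 + d.getD (i - 1).toNat 0)) distribution
  | _, _ => []   -- unreachable under Pre_: max()/min() raise ValueError on []

-- ===== PORT B =====
def create_counting_alt (prices : List Int) : List Int :=
  match PySem.List.max? prices (fun x => x) with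
  | none => []   -- unreachable under Pre_: max() raises ValueError on []
  | some high_bound =>
    match PySem.List.min? prices (fun x => x) with
    | none => []   -- unreachable under Pre_: min() raises ValueError on []
    | some low_bound =>
        let ordered := PySem.List.sorted prices (fun x => x)
        (PySem.List.pyRange 0 (high_bound - low_bound + 1)).map
          (fun i => (PySem.List.bisectRight ordered (low_bound + i) : Int))

-- ===== PRECONDITION & SPEC =====
-- Python's max/min raise ValueError on the empty list (in both A and B), so [] is excluded.
def Pre_create_counting (prices : List Int) : Prop := prices ≠ []
instance (prices : List Int) : Decidable (Pre_create_counting prices) := by unfold Pre_create_counting; infer_instance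
def pvWitness_create_counting : List Int := [2, 1, 3]

def Spec_create_counting (prices : List Int) (out : List Int) : Prop := out = create_counting_alt prices
instance (prices : List Int) (out : List Int) : Decidable (Spec_create_counting prices out) := by unfold Spec_create_counting; infer_instance

-- ===== CLAIM (what is proved, stated in full; the proofs are below) =====
def Claim_equal_create_counting : Prop := ∀ (prices : List Int), Dom_create_counting prices → Pre_create_counting prices → Spec_create_counting prices (create_counting prices)

-- ===== LEMMAS AND PROOFS =====

-- Counting loop of A: entry j gains the number of elements p of l with p - lo = j.
lemma countFold (lo : Int) (l : List Int) : ∀ (acc : List Int),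
    (∀ p ∈ l, 0 ≤ p - lo ∧ (p - lo).toNat < acc.length) →
      ((l.foldl (fun d price => d.set (price - lo).toNat (d.getD (price - lo).toNat 0 + 1)) acc).length = acc.length ∧
      ∀ j, j < acc.length →
        (l.foldl (fun d price => d.set (price - lo).toNat (d.getD (price - lo).toNat 0 + 1)) acc).getD j 0
          = acc.getD j 0 + (l.countP (fun p => decide (p - lo = (j : Int))) : Int)) := by
  induction l with
  | nil => intro acc _; simp
  | cons p l ih =>
    intro acc h
    have hp := h p (by simp)
    have hl : ∀ q ∈ l, 0 ≤ q - lo ∧ (q - lo).toNat < (acc.set (p - lo).toNat (acc.getD (p - lo).toNat 0 + 1)).length := by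
      intro q hq
      rw [List.length_set]
      exact h q (by simp [hq])
    obtain ⟨L1, L2⟩ := ih (acc.set (p - lo).toNat (acc.getD (p - lo).toNat 0 + 1)) hl
    rw [List.length_set] at L1
    constructor
    · simpa using L1
    · intro j hj
      rw [List.foldl_cons, L2 j (by rw [List.length_set]; exact hj), List.countP_cons]
      have hgd : (acc.set (p - lo).toNat (acc.getD (p - lo).toNat 0 + 1)).getD j 0
          = if (p - lo).toNat = j then acc.getD (p - lo).toNat 0 + 1 else acc.getD j 0 := by
        rw [List.getD_eq_getElem _ _ (by rw [List.length_set]; exact hj), List.getElem_set]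
        split_ifs with h1
        · rfl
        · exact (List.getD_eq_getElem _ _ hj).symm
      rw [hgd]
      by_cases hc : p - lo = (j : Int)
      · have heq : (p - lo).toNat = j := by omega
        rw [if_pos heq, heq]
        have hd : (decide (p - lo = (j : Int))) = true := by simpa using hc
        rw [hd, if_pos rfl]
        push_cast
        ring
      · have hne : (p - lo).toNat ≠ j := by omega
        have hd : (decide (p - lo = (j : Int))) = false := by simpa using hc
        rw [if_neg hne, hd]
        simp

-- Prefix-sum loop of A: turns per-value counts c into running totals g.
lemma prefixFold (c g : Nat → Int) (n : Nat)
    (hstep : ∀ i, 1 ≤ i → i < n → g i = g (i - 1) + c i) :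
    ∀ (k m : Nat) (s : List Int), n - m = k → s.length = n → 1 ≤ m →
      (∀ i, i < m → i < n → s.getD i 0 = g i) → (∀ i, m ≤ i → i < n → s.getD i 0 = c i) →
      ((PySem.List.pyRange (m : Int) (n : Int)).foldl
          (fun d i => d.set i.toNat (d.getD i.toNat 0 + d.getD (i - 1).toNat 0)) s).length = n ∧
      ∀ i, i < n → ((PySem.List.pyRange (m : Int) (n : Int)).foldl
          (fun d i => d.set i.toNat (d.getD i.toNat 0 + d.getD (i - 1).toNat 0)) s).getD i 0 = g i := by
  intro k
  induction k with
  | zero =>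
    intro m s hk hs hm h1 h2
    have hnm : ¬((m : Int) < (n : Int)) := by omega
    have hempty : PySem.List.pyRange (m : Int) (n : Int) = [] := by
      simp [PySem.List.pyRange, hnm]
    rw [hempty, List.foldl_nil]
    exact ⟨hs, fun i hi => h1 i (by omega) hi⟩
  | succ k ihk =>
    intro m s hk hs hm h1 h2
    have hmn : (m : Int) < (n : Int) := by omega
    rw [PySem.List.pyRange_one_cons hmn, List.foldl_cons]
    have hmnat : m < n := by omega
    have ht1 : ((m : Int)).toNat = m := by omega
    have ht2 : ((m : Int) - 1).toNat = m - 1 := by omega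
    set s' := s.set ((m : Int)).toNat (s.getD ((m : Int)).toNat 0 + s.getD (((m : Int)) - 1).toNat 0) with hs'
    have hlen' : s'.length = n := by rw [hs', List.length_set]; exact hs
    have hval : s'.getD m 0 = g m := by
      have e1 : s'.getD m 0 = s.getD m 0 + s.getD (m - 1) 0 := by
        rw [hs', ht1, ht2]
        rw [List.getD_eq_getElem _ _ (by rw [List.length_set, hs]; exact hmnat), List.getElem_set,
          if_pos rfl]
      rw [e1, h2 m le_rfl hmnat, h1 (m - 1) (by omega) (by omega), hstep m hm hmnat]
      ring
    have hother : ∀ j, j ≠ m → j < n → s'.getD j 0 = s.getD j 0 := by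
      intro j hjm hjn
      rw [hs', ht1]
      rw [List.getD_eq_getElem _ _ (by rw [List.length_set, hs]; exact hjn), List.getElem_set,
        if_neg (fun h => hjm h.symm), ← List.getD_eq_getElem _ _ (by rw [hs]; exact hjn)]
    have hcast : ((m : Int)) + 1 = ((m + 1 : Nat) : Int) := by push_cast; ring
    rw [hcast]
    apply ihk (m + 1) s' (by omega) hlen' (by omega)
    · intro i hi hin
      by_cases him : i = m
      · rw [him]; exact hval
      · rw [hother i him hin]; exact h1 i (by omega) hin
    · intro i hi hin
      rw [hother i (by omega) hin]
      exact h2 i (by omega) hin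

-- On a list of elements ≥ lo, counting p ≤ lo is counting p - lo = 0.
lemma count_le_zero (lo : Int) (l : List Int) (h : ∀ p ∈ l, lo ≤ p) :
    l.countP (fun p => decide (p ≤ lo)) = l.countP (fun p => decide (p - lo = 0)) := by
  induction l with
  | nil => simp
  | cons p l ih =>
    have hp := h p (by simp)
    have ih' := ih (fun q hq => h q (by simp [hq]))
    simp only [List.countP_cons, ih']
    congr 1
    by_cases hc : p ≤ lo
    · simp [hc, show p - lo = 0 by omega]
    · simp [hc, show ¬(p - lo = 0) by omega]

-- Cumulative step: #{p ≤ lo+i} = #{p ≤ lo+(i-1)} + #{p - lo = i}  (1 ≤ i).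
lemma count_le_step (lo : Int) (i : Nat) (hi : 1 ≤ i) (l : List Int) :
    l.countP (fun p => decide (p ≤ lo + (i : Int))) =
    l.countP (fun p => decide (p ≤ lo + ((i - 1 : Nat) : Int))) +
      l.countP (fun p => decide (p - lo = (i : Int))) := by
  induction l with
  | nil => simp
  | cons p l ih =>
    simp only [List.countP_cons, ih]
    have hc : ((i - 1 : Nat) : Int) = (i : Int) - 1 := by omega
    by_cases h1 : p ≤ lo + (i : Int) <;> by_cases h2 : p ≤ lo + ((i - 1 : Nat) : Int) <;>
      by_cases h3 : p - lo = (i : Int) <;> simp [h1, h2, h3] <;> omega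

-- bisect_right on a sorted list counts the elements ≤ x.
lemma bisect_eq_countP (ys : List Int) (x : Int) (hs : ys.Pairwise (fun a b => a ≤ b)) :
    ys.countP (fun p => decide (p ≤ x)) = PySem.List.bisectRight ys x := by
  obtain ⟨hle, hlt, hgt⟩ := PySem.List.bisectRight_spec ys x hs
  conv_lhs => rw [← List.take_append_drop (PySem.List.bisectRight ys x) ys]
  rw [List.countP_append]
  have h1 : (ys.take (PySem.List.bisectRight ys x)).countP (fun p => decide (p ≤ x))
      = (ys.take (PySem.List.bisectRight ys x)).length := by
    rw [List.countP_eq_length]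
    intro a ha
    obtain ⟨i, hilen, rfl⟩ := List.mem_iff_getElem.mp ha
    have hi' : i < ys.length := by simp [List.length_take] at hilen; omega
    have hir : i < PySem.List.bisectRight ys x := by simp [List.length_take] at hilen; omega
    rw [List.getElem_take]
    simpa using hlt i hi' hir
  have h2 : (ys.drop (PySem.List.bisectRight ys x)).countP (fun p => decide (p ≤ x)) = 0 := by
    rw [List.countP_eq_zero]
    intro a ha
    obtain ⟨i, hilen, rfl⟩ := List.mem_iff_getElem.mp ha
    rw [List.getElem_drop]
    have hx := hgt (PySem.List.bisectRight ys x + i) (by simp at hilen; omega) (by omega)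
    simp only [decide_eq_true_eq]
    omega
  rw [h1, h2, List.length_take]
  omega

-- ===== VERDICT (by name: the statement is the Claim_ definition above) =====
theorem create_counting_spec : Claim_equal_create_counting := by
  intro prices _hdom hpre
  unfold Spec_create_counting
  cases hmx : PySem.List.max? prices (fun x => x) with
  | none => exact absurd ((PySem.List.max?_eq_none_iff _ _).mp hmx) hpre
  | some hi =>
  cases hmn : PySem.List.min? prices (fun x => x) with
  | none => exact absurd ((PySem.List.min?_eq_none_iff _ _).mp hmn) hpre
  | some lo =>
  have hub : ∀ p ∈ prices, p ≤ hi := PySem.List.max?_isMax hmx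
  have hlb : ∀ p ∈ prices, lo ≤ p := PySem.List.min?_isMin hmn
  have hlohi : lo ≤ hi := hub lo (PySem.List.min?_mem hmn)
  set n := (hi - lo + 1).toNat with hn
  have hnc : (n : Int) = hi - lo + 1 := by omega
  have hn1 : 1 ≤ n := by omega
  set c : Nat → Int := fun j => (prices.countP (fun p => decide (p - lo = (j : Int))) : Int) with hc
  set g : Nat → Int := fun j => (prices.countP (fun p => decide (p ≤ lo + (j : Int))) : Int) with hg
  have hg0 : g 0 = c 0 := by
    simp only [hg, hc, Nat.cast_zero, add_zero]
    exact_mod_cast count_le_zero lo prices hlb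
  have hstep : ∀ i, 1 ≤ i → i < n → g i = g (i - 1) + c i := by
    intro i h1i _
    simp only [hg, hc]
    exact_mod_cast count_le_step lo i h1i prices
  have hball : ∀ p ∈ prices, 0 ≤ p - lo ∧ (p - lo).toNat < (List.replicate n (0 : Int)).length := by
    intro p hp
    have h1 := hlb p hp
    have h2 := hub p hp
    rw [List.length_replicate]
    omega
  obtain ⟨CL, CE⟩ := countFold lo prices (List.replicate n (0 : Int)) hball
  rw [List.length_replicate] at CL
  set C := prices.foldl (fun d price => d.set (price - lo).toNat (d.getD (price - lo).toNat 0 + 1))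
      (List.replicate n (0 : Int)) with hC
  have hCval : ∀ j, j < n → C.getD j 0 = c j := by
    intro j hj
    rw [CE j (by rw [List.length_replicate]; exact hj), List.getD_replicate (0 : Int) hj]
    simp [hc]
  obtain ⟨PL, PE⟩ := prefixFold c g n hstep (n - 1) 1 C (by omega) CL le_rfl
    (by intro i hi hin
        have hi0 : i = 0 := by omega
        rw [hi0, hCval 0 hn1, hg0])
    (fun i hi hin => hCval i hin)
  simp only [Nat.cast_one] at PL PE
  have hsortP : (PySem.List.sorted prices (fun x => x)).Pairwise (fun a b => a ≤ b) := by
    simpa using PySem.List.sorted_pairwise prices (fun x => x)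
  have hbis : ∀ j : Nat,
      (PySem.List.bisectRight (PySem.List.sorted prices (fun x => x)) (lo + (j : Int)) : Int) = g j := by
    intro j
    rw [← bisect_eq_countP _ _ hsortP,
      List.Perm.countP_eq _ (PySem.List.sorted_perm prices (fun x => x) false)]
  simp only [create_counting, create_counting_alt, hmx, hmn]
  rw [← hn, ← hnc, PySem.List.pyRange_zero_natCast, List.map_map]
  rw [← hC, CL]
  refine List.ext_getElem ?_ ?_
  · rw [PL]
    simp
  · intro i h₁ h₂
    have hin : i < n := by simpa using h₂
    rw [← List.getD_eq_getElem _ (0 : Int) h₁, PE i hin]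
    simp only [List.getElem_map, List.getElem_range, Function.comp_apply]
    exact (hbis i).symm
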